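-- pv_equiv track=rewrite | github.com/Jacob-xyb/leetcode_Jacob | python/Jx2023/2535. 数组元素和与数字和的绝对差_S_END.py | differenceOfSumV1_1
-- ===== SOURCE A (Python) =====
-- from typing import List
--
-- def differenceOfSumV1_1(nums: List[int]) -> int:
--     sum1 = sum(nums)
--     sum2 = 0
--     for num in nums:
--         while num:
--             sum2 += num % 10
--             num //= 10
--     return sum1 - sum2
-- ===== SOURCE B (Python) =====
-- from typing import List
--
-- def differenceOfSumV1_1(nums: List[int]) -> int:
--     # Digit sum via the decimal string of each number (ord(c) - 48 = the digit's value).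
--     return sum(nums) - sum(ord(c) - 48 for n in nums for c in str(n))
-- ===== Notes on version B (the rewrite author's own statement) =====
-- stated objective: idiomatic
-- what changed: Digit sums are read off the decimal string of each number in a single generator expression instead of peeling digits with an arithmetic mod/div while-loop and running accumulators.
-- outside the precondition, e.g. on differenceOfSumV1_1([-3]): A does not finish within the time limit, B returns -3
import Mathlib
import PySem

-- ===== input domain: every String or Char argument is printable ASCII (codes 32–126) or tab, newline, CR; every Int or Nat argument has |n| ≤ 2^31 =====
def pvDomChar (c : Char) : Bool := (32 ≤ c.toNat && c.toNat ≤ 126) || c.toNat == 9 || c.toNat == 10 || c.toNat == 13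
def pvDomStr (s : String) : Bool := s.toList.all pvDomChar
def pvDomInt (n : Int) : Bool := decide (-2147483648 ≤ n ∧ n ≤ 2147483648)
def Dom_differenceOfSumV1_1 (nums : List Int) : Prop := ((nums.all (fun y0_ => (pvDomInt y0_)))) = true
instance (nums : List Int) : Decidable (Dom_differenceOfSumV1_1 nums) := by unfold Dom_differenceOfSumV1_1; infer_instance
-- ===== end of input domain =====

-- B reads each number's digit sum off its decimal string instead of A's arithmetic mod/div while-loop (idiomatic; same cost).


-- ===== PORT A =====
-- A's inner 'while num: sum2 += num % 10; num //= 10'.  Python's loop never terminates for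
-- negative num (excluded by Pre_); there the port simply stops and returns the accumulator.
def pyDigitLoop (num sum2 : Int) : Int :=
  if _h : 0 < num then
    pyDigitLoop (PySem.Int.floordiv num 10) (sum2 + PySem.Int.mod num 10)
  else sum2
termination_by num.toNat
decreasing_by
  simp only [PySem.Int.floordiv]
  rw [Int.fdiv_eq_ediv]
  norm_num
  omega

def differenceOfSumV1_1 (nums : List Int) : Int :=
  let sum1 := nums.foldl (fun a b => a + b) 0
  let sum2 := nums.foldl (fun s num => pyDigitLoop num s) 0
  sum1 - sum2

-- ===== PORT B =====
-- ord(c) - 48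
def charDigit (c : Char) : Int := (c.toNat : Int) - 48

def differenceOfSumV1_1_alt (nums : List Int) : Int :=
  nums.foldl (fun a b => a + b) 0 -
    (nums.flatMap (fun n => (PySem.Int.toStr n).toList)).foldl (fun s c => s + charDigit c) 0

-- ===== PRECONDITION & SPEC =====
-- Pre_ excludes lists containing a negative number: there A's while-loop never terminates
-- (num //= 10 stabilises at -1), so A returns on exactly the all-nonnegative lists.
def Pre_differenceOfSumV1_1 (nums : List Int) : Prop := ∀ n ∈ nums, 0 ≤ n
instance (nums : List Int) : Decidable (Pre_differenceOfSumV1_1 nums) := by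
  unfold Pre_differenceOfSumV1_1; infer_instance

def pvWitness_differenceOfSumV1_1 : List Int := [0, 7, 12, 345]

def Spec_differenceOfSumV1_1 (nums : List Int) (out : Int) : Prop := out = differenceOfSumV1_1_alt nums
instance (nums : List Int) (out : Int) : Decidable (Spec_differenceOfSumV1_1 nums out) := by unfold Spec_differenceOfSumV1_1; infer_instance

-- ===== CLAIM (what is proved, stated in full; the proofs are below) =====
def Claim_equal_differenceOfSumV1_1 : Prop := ∀ (nums : List Int), Dom_differenceOfSumV1_1 nums → Pre_differenceOfSumV1_1 nums → Spec_differenceOfSumV1_1 nums (differenceOfSumV1_1 nums)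

-- ===== LEMMAS AND PROOFS =====

def csum (l : List Char) : Int := (l.map charDigit).sum

theorem foldl_charDigit (l : List Char) (a : Int) :
    l.foldl (fun s c => s + charDigit c) a = a + csum l := by
  induction l generalizing a with
  | nil => simp [csum]
  | cons c t ih =>
    simp only [List.foldl_cons, csum, List.map_cons, List.sum_cons] at *
    rw [ih]; ring

theorem charDigit_digitChar {d : ℕ} (h : d < 10) :
    charDigit (Nat.digitChar d) = (d : Int) := by
  interval_cases d <;> decide

theorem csum_toDigitsCore (fuel : ℕ) :
    ∀ (n : ℕ) (acc : List Char), n ≤ fuel →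
      csum (Nat.toDigitsCore 10 fuel n acc) = ((Nat.digits 10 n).sum : Int) + csum acc := by
  induction fuel with
  | zero =>
    intro n acc h
    interval_cases n
    simp [Nat.toDigitsCore]
  | succ fuel ih =>
    intro n acc h
    rw [Nat.toDigitsCore]
    by_cases h0 : n / 10 = 0
    · have hn : n < 10 := by omega
      simp only [h0, if_true]
      rcases Nat.eq_zero_or_pos n with h1 | h1
      · subst h1; simp [csum, charDigit]; decide
      · rw [Nat.digits_def' (by norm_num) h1, h0]
        simp only [csum, List.map_cons, List.sum_cons, Nat.digits_zero, charDigit_digitChar (Nat.mod_lt n (by norm_num))]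
        push_cast
        simp
    · simp only [h0, if_false]
      have hn : 0 < n := by omega
      rw [ih (n / 10) _ (by omega)]
      rw [Nat.digits_def' (by norm_num) hn]
      simp only [csum, List.map_cons, List.sum_cons,
        charDigit_digitChar (Nat.mod_lt n (by norm_num))]
      push_cast
      ring

theorem csum_toChars (n : Int) (h : 0 ≤ n) :
    csum (PySem.Int.toChars n) = ((Nat.digits 10 n.toNat).sum : Int) := by
  rw [PySem.Int.toChars]
  rw [if_neg (by omega)]
  rw [Nat.toDigits, csum_toDigitsCore _ _ _ (by omega)]
  simp [csum]

theorem pyDigitLoop_eq_nat (m : ℕ) : ∀ (s : Int),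
    pyDigitLoop (m : Int) s = s + ((Nat.digits 10 m).sum : Int) := by
  induction m using Nat.strong_induction_on with
  | _ m ih =>
    intro s
    rw [pyDigitLoop.eq_def]
    by_cases hm : 0 < m
    · rw [dif_pos (by exact_mod_cast hm)]
      have hfd : PySem.Int.floordiv (m : Int) 10 = ((m / 10 : ℕ) : Int) := by
        simp only [PySem.Int.floordiv]
        rw [Int.fdiv_eq_ediv]
        norm_num
      have hmd : PySem.Int.mod (m : Int) 10 = ((m % 10 : ℕ) : Int) := by
        simp [PySem.Int.mod, Int.fmod_eq_emod]
      rw [hfd, hmd, ih (m / 10) (Nat.div_lt_self hm (by norm_num))]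
      rw [Nat.digits_def' (by norm_num) hm]
      simp only [List.sum_cons]
      push_cast
      ring
    · have : m = 0 := by omega
      subst this
      rw [dif_neg (by norm_num)]
      simp

theorem pyDigitLoop_eq (n : Int) (h : 0 ≤ n) (s : Int) :
    pyDigitLoop n s = s + csum (PySem.Int.toChars n) := by
  rw [csum_toChars n h]
  have hn : n = ((n.toNat : ℕ) : Int) := by omega
  conv_lhs => rw [hn]
  rw [pyDigitLoop_eq_nat]

theorem csum_append (l1 l2 : List Char) : csum (l1 ++ l2) = csum l1 + csum l2 := by
  simp [csum]

theorem sum2_eq (nums : List Int) (h : ∀ n ∈ nums, 0 ≤ n) : ∀ (a : Int),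
    nums.foldl (fun s num => pyDigitLoop num s) a
      = a + csum (nums.flatMap (fun n => PySem.Int.toChars n)) := by
  induction nums with
  | nil => intro a; simp [csum]
  | cons x t ih =>
    intro a
    simp only [List.foldl_cons, List.flatMap_cons]
    rw [ih (fun n hn => h n (List.mem_cons_of_mem _ hn)),
        pyDigitLoop_eq x (h x (List.mem_cons_self)), csum_append]
    ring

-- ===== VERDICT (by name: the statement is the Claim_ definition above) =====
theorem differenceOfSumV1_1_spec : Claim_equal_differenceOfSumV1_1 := by
  intro nums _ hpre
  unfold Spec_differenceOfSumV1_1 differenceOfSumV1_1 differenceOfSumV1_1_alt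
  simp only [PySem.Int.toList_toStr]
  rw [sum2_eq nums hpre 0, foldl_charDigit]
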